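-- pv_equiv track=rewrite | github.com/tde-nico/defcon-finals-ctf-2024 | sokoban/rewritten_loldemort.py | bloat_map
-- ===== SOURCE A (Python) =====
-- def bloat_map(map_str):
--     rendered_map = ''
--     for line in map_str.split('\n'):
--         for i in range(2):
--             for col in line:
--                 rendered_map += col * 2
--             rendered_map += '\n'
--     return rendered_map[:-1]
-- ===== SOURCE B (Python) =====
-- def bloat_map(map_str):
--     doubled = ''.join(c * 2 for c in map_str)
--     return '\n'.join(seg + '\n' + seg for seg in doubled.split('\n\n'))
-- ===== Notes on version B (the rewrite author's own statement) =====
-- stated objective: faster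
-- what changed: B doubles every character of the whole string in a single pass (each newline becoming a doubled newline), then splits the doubled string on the doubled newline and joins each segment as segment+newline+segment, eliminating A's per-line triple-nested doubling loop with repeated string concatenation and its trailing-strip.
import Mathlib
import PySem

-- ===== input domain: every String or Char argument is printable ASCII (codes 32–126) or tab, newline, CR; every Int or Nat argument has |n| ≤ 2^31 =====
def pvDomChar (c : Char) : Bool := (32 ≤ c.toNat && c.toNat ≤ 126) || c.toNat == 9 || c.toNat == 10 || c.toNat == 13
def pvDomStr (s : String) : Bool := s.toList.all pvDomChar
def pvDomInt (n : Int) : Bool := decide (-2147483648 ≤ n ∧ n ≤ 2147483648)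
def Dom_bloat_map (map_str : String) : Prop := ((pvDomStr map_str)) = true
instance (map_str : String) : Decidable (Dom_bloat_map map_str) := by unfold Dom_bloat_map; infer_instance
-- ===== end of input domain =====

-- B doubles every character of the whole string in one pass ('\n' becoming '\n\n'), then splits the
-- doubled string on '\n\n' and joins each segment twice; no per-line loop, no [:-1] strip (objective: alternative).


-- ===== PORT A =====
-- state is a List Char (exact for string concatenation); split/repeat/[:-1] via PySem
def bloat_map (map_str : String) : String :=
  let rendered : List Char :=
    (PySem.Chars.splitOn map_str.toList ['\n']).foldl (fun acc line =>
      (PySem.List.pyRange 0 2 1).foldl (fun acc _ =>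
        (line.foldl (fun acc c => acc ++ PySem.List.pyRepeat [c] 2) acc) ++ ['\n']) acc) []
  String.ofList (PySem.List.slice rendered none (some (-1)))

-- ===== PORT B =====
-- whole-string char doubling, then split on the doubled newline, duplicate each segment, join
def bloat_map_alt (map_str : String) : String :=
  let doubled : List Char := map_str.toList.flatMap (fun c => PySem.List.pyRepeat [c] 2)
  String.ofList (PySem.Chars.join ['\n']
    ((PySem.Chars.splitOn doubled ['\n', '\n']).map (fun seg => seg ++ ['\n'] ++ seg)))

-- ===== PRECONDITION & SPEC =====
def Spec_bloat_map (map_str : String) (out : String) : Prop := out = bloat_map_alt map_str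
instance (map_str : String) (out : String) : Decidable (Spec_bloat_map map_str out) := by unfold Spec_bloat_map; infer_instance

-- ===== CLAIM (what is proved, stated in full; the proofs are below) =====
def Claim_equal_bloat_map : Prop := ∀ (map_str : String), Dom_bloat_map map_str → Spec_bloat_map map_str (bloat_map map_str)

-- ===== LEMMAS AND PROOFS =====

-- structural single-'\n' split, back-to-front (proof-only reference spec for both splitOn calls)
def pvSplitNl : List Char → List (List Char)
  | [] => [[]]
  | c :: t => if c = '\n' then [] :: pvSplitNl t else
      match pvSplitNl t with
      | [] => [[c]]
      | x :: xs => (c :: x) :: xs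

def pvConsHead (p : List Char) : List (List Char) → List (List Char)
  | [] => [p]
  | x :: xs => (p ++ x) :: xs

def pvDbl (l : List Char) : List Char := l.flatMap (fun c => PySem.List.pyRepeat [c] 2)

theorem pvSplitNl_ne_nil (l : List Char) : pvSplitNl l ≠ [] := by
  induction l with
  | nil => simp [pvSplitNl]
  | cons c t ih =>
    simp only [pvSplitNl]
    split_ifs
    · simp
    · cases h : pvSplitNl t <;> simp

theorem pvConsHead_assoc (p q : List Char) (xs : List (List Char)) :
    pvConsHead p (pvConsHead q xs) = pvConsHead (p ++ q) xs := by
  cases xs <;> simp [pvConsHead]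

theorem pvConsHead_map_dbl (p : List Char) (xs : List (List Char)) :
    (pvConsHead p xs).map pvDbl = pvConsHead (pvDbl p) (xs.map pvDbl) := by
  cases xs <;> simp [pvConsHead, pvDbl]

theorem pvSplitNl_cons_ne (c : Char) (t : List Char) (hc : c ≠ '\n') :
    pvSplitNl (c :: t) = pvConsHead [c] (pvSplitNl t) := by
  have h := pvSplitNl_ne_nil t
  simp only [pvSplitNl]
  rw [if_neg hc]
  cases hx : pvSplitNl t with
  | nil => exact absurd hx h
  | cons x xs => simp [pvConsHead]

-- go on sep ['\n'] with sufficient fuel computes pvSplitNl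
theorem pv_go_one (l : List Char) : ∀ (cur : List Char) (acc : List (List Char)) (k : Nat),
    PySem.Chars.splitOn.go ['\n'] (l.length + 1 + k) l cur acc
      = acc.reverse ++ pvConsHead cur.reverse (pvSplitNl l) := by
  induction l with
  | nil => intro cur acc k; simp [PySem.Chars.splitOn.go, pvSplitNl, pvConsHead]
  | cons c t ih =>
    intro cur acc k
    have hfu : (c :: t).length + 1 + k = (t.length + 1 + k) + 1 := by simp; omega
    rw [hfu, PySem.Chars.splitOn.go]
    by_cases hc : c = '\n'
    · subst hc
      rw [if_pos (by simp [List.isPrefixOf])]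
      simp only [List.length_cons, List.length_nil, List.drop_succ_cons, List.drop_zero]
      rw [ih [] (cur.reverse :: acc) k]
      have h := pvSplitNl_ne_nil t
      cases hx : pvSplitNl t with
      | nil => exact absurd hx h
      | cons x xs => simp [pvSplitNl, pvConsHead, hx]
    · rw [if_neg (by simp [List.isPrefixOf]; intro h; exact absurd h.symm hc)]
      rw [ih (c :: cur) acc k, pvSplitNl_cons_ne c t hc]
      rw [pvConsHead_assoc]
      simp

theorem pv_splitOn_one (s : List Char) :
    PySem.Chars.splitOn s ['\n'] = pvSplitNl s := by
  have := pv_go_one s [] [] 0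
  simp only [PySem.Chars.splitOn]
  rw [this]
  have h := pvSplitNl_ne_nil s
  cases hx : pvSplitNl s with
  | nil => exact absurd hx h
  | cons x xs => simp [pvConsHead]

-- go on sep ['\n','\n'] applied to a doubled string computes the doubled pvSplitNl
theorem pv_go_two (l : List Char) : ∀ (cur : List Char) (acc : List (List Char)) (k : Nat),
    PySem.Chars.splitOn.go ['\n', '\n'] ((pvDbl l).length + 1 + k) (pvDbl l) cur acc
      = acc.reverse ++ pvConsHead cur.reverse ((pvSplitNl l).map pvDbl) := by
  induction l with
  | nil => intro cur acc k; simp [pvDbl, PySem.Chars.splitOn.go, pvSplitNl, pvConsHead]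
  | cons c t ih =>
    intro cur acc k
    have hd : pvDbl (c :: t) = c :: c :: pvDbl t := by
      simp [pvDbl, PySem.List.pyRepeat]
    rw [hd]
    by_cases hc : c = '\n'
    · subst hc
      have hfu : ('\n' :: '\n' :: pvDbl t).length + 1 + k
          = ((pvDbl t).length + 1 + (k + 1)) + 1 := by simp; omega
      rw [hfu]
      rw [PySem.Chars.splitOn.go, if_pos (by simp [List.isPrefixOf])]
      simp only [List.length_cons, List.length_nil, List.drop_succ_cons, List.drop_zero]
      rw [ih [] (cur.reverse :: acc) (k + 1)]
      have h := pvSplitNl_ne_nil t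
      cases hx : pvSplitNl t with
      | nil => exact absurd hx h
      | cons x xs => simp [pvSplitNl, pvConsHead, hx, pvDbl]
    · have hfu : (c :: c :: pvDbl t).length + 1 + k
          = (((pvDbl t).length + 1 + k) + 1) + 1 := by simp; omega
      rw [hfu]
      rw [PySem.Chars.splitOn.go, if_neg (by simp [List.isPrefixOf]; intro h; exact absurd h.symm hc)]
      rw [PySem.Chars.splitOn.go, if_neg (by simp [List.isPrefixOf]; intro h; exact absurd h.symm hc)]
      rw [ih (c :: c :: cur) acc k, pvSplitNl_cons_ne c t hc]
      rw [pvConsHead_map_dbl, pvConsHead_assoc]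
      have : pvDbl [c] = [c, c] := by simp [pvDbl, PySem.List.pyRepeat]
      simp [this]

theorem pv_splitOn_two (s : List Char) :
    PySem.Chars.splitOn (pvDbl s) ['\n', '\n'] = (pvSplitNl s).map pvDbl := by
  have := pv_go_two s [] [] 0
  simp only [PySem.Chars.splitOn]
  rw [this]
  have h := pvSplitNl_ne_nil s
  cases hx : pvSplitNl s with
  | nil => exact absurd hx h
  | cons x xs => simp [pvConsHead]

-- dropping the last '\n' of a newline-terminated block list is the '\n'-join
theorem pv_dropLast_flatMap_eq_intercalate (rs : List (List Char)) (h : rs ≠ []) :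
    (rs.flatMap (fun r => r ++ ['\n'])).dropLast = List.intercalate ['\n'] rs := by
  induction rs with
  | nil => exact absurd rfl h
  | cons r rs ih =>
    cases rs with
    | nil => simp [List.intercalate]
    | cons r' rs' =>
      have hne : ((r' :: rs').flatMap (fun r => r ++ ['\n'])) ≠ [] := by simp
      rw [List.flatMap_cons, List.dropLast_append_of_ne_nil hne, ih (by simp)]
      simp [List.intercalate]

-- intercalate over a cons with a nonempty tail
theorem pv_intercalate_cons (sep x : List Char) (xs : List (List Char)) (h : xs ≠ []) :
    List.intercalate sep (x :: xs) = x ++ sep ++ List.intercalate sep xs := by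
  cases xs with
  | nil => exact absurd rfl h
  | cons y ys => simp [List.intercalate, List.intersperse]

-- intercalating the element-duplicated list = intercalating the seg++sep++seg segments
theorem pv_intercalate_dup (sep : List Char) (f : List Char → List Char) (xs : List (List Char)) :
    List.intercalate sep (xs.flatMap (fun x => [f x, f x]))
      = List.intercalate sep (xs.map (fun x => f x ++ sep ++ f x)) := by
  induction xs with
  | nil => rfl
  | cons x xs ih =>
    cases xs with
    | nil => simp [List.intercalate, List.intersperse]
    | cons y ys =>
      have h1 : (y :: ys).flatMap (fun x => [f x, f x]) ≠ [] := by simp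
      have h2 : f x :: (y :: ys).flatMap (fun x => [f x, f x]) ≠ [] := by simp
      have h3 : (y :: ys).map (fun x => f x ++ sep ++ f x) ≠ [] := by simp
      rw [List.flatMap_cons,
          show [f x, f x] ++ ((y :: ys).flatMap fun x => [f x, f x])
            = f x :: f x :: ((y :: ys).flatMap fun x => [f x, f x]) from rfl,
          pv_intercalate_cons sep _ _ h2, pv_intercalate_cons sep _ _ h1, ih,
          show (x :: y :: ys).map (fun x => f x ++ sep ++ f x)
            = (f x ++ sep ++ f x) :: ((y :: ys).map fun x => f x ++ sep ++ f x) from rfl,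
          pv_intercalate_cons sep _ _ h3]
      simp [List.append_assoc]

-- ===== VERDICT (by name: the statement is the Claim_ definition above) =====
theorem bloat_map_spec : Claim_equal_bloat_map := by
  intro map_str _
  unfold Spec_bloat_map bloat_map bloat_map_alt
  dsimp only
  set s := map_str.toList with hs
  set w := pvDbl with hw
  -- A side: reduce the triple foldl to a flatMap over the split lines
  have hA : (PySem.Chars.splitOn s ['\n']).foldl (fun acc line =>
      (PySem.List.pyRange 0 2 1).foldl (fun acc _ =>
        (line.foldl (fun acc c => acc ++ PySem.List.pyRepeat [c] 2) acc) ++ ['\n']) acc) []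
      = (pvSplitNl s).flatMap (fun line => (w line ++ ['\n']) ++ (w line ++ ['\n'])) := by
    rw [pv_splitOn_one]
    have hstep : ∀ (line : List Char) (acc : List Char),
        (PySem.List.pyRange 0 2 1).foldl (fun acc _ =>
          (line.foldl (fun acc c => acc ++ PySem.List.pyRepeat [c] 2) acc) ++ ['\n']) acc
        = acc ++ ((w line ++ ['\n']) ++ (w line ++ ['\n'])) := by
      intro line acc
      have h2 : PySem.List.pyRange 0 2 1 = [0, 1] := by decide
      rw [h2]
      simp [List.foldl, hw, pvDbl, List.flatMap]
    calc (pvSplitNl s).foldl (fun acc line =>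
          (PySem.List.pyRange 0 2 1).foldl (fun acc _ =>
            (line.foldl (fun acc c => acc ++ PySem.List.pyRepeat [c] 2) acc) ++ ['\n']) acc) []
        = (pvSplitNl s).foldl (fun acc line => acc ++ ((w line ++ ['\n']) ++ (w line ++ ['\n']))) [] := by
          exact PySem.List.foldl_congr_mem _ _ _ _ (fun acc line _ => hstep line acc)
      _ = (pvSplitNl s).flatMap (fun line => (w line ++ ['\n']) ++ (w line ++ ['\n'])) :=
          PySem.List.foldl_append_eq_flatMap _ _ _
  rw [hA]
  -- B side: the split of the doubled string is the doubled split
  have hB : PySem.Chars.splitOn (s.flatMap (fun c => PySem.List.pyRepeat [c] 2)) ['\n', '\n']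
      = (pvSplitNl s).map w := by
    rw [show s.flatMap (fun c => PySem.List.pyRepeat [c] 2) = pvDbl s from rfl]
    exact pv_splitOn_two s
  rw [hB]
  rw [PySem.List.slice_to_neg_one, PySem.Chars.join]
  have hflat : (pvSplitNl s).flatMap (fun line => (w line ++ ['\n']) ++ (w line ++ ['\n']))
      = ((pvSplitNl s).flatMap (fun line => [w line, w line])).flatMap (fun r => r ++ ['\n']) := by
    rw [List.flatMap_assoc]
    simp
  have hrows_ne : (pvSplitNl s).flatMap (fun line => [w line, w line]) ≠ [] := by
    rcases List.exists_cons_of_ne_nil (pvSplitNl_ne_nil s) with ⟨a, b, hab⟩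
    rw [hab]
    simp
  rw [hflat, pv_dropLast_flatMap_eq_intercalate _ hrows_ne, pv_intercalate_dup ['\n'] w]
  simp [List.map_map, Function.comp_def]
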